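-- pv_equiv track=rewrite | github.com/yszheda/blog | recategorize_articles.py | find_metadata_insert_position
-- ===== SOURCE A (Python) =====
-- def find_metadata_insert_position(lines):
--     """Find the best position to insert Category metadata."""
--     # Look for Slug line first
--     for i, line in enumerate(lines):
--         if line.startswith("Slug:"):
--             return i + 1
--
--     # If no Slug, look for Date line
--     for i, line in enumerate(lines):
--         if line.startswith("Date:"):
--             return i + 1
--
--     # If neither found, insert after Title
--     for i, line in enumerate(lines):
--         if line.startswith("Title:"):
--             return i + 1
--
--     # Fallback: insert at beginning
--     return 0
-- ===== SOURCE B (Python) =====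
-- def find_metadata_insert_position(lines):
--     """Find the best position to insert Category metadata."""
--     # Single pass: remember the insert position after the first Slug/Date/Title line.
--     slug = date = title = None
--     for i, line in enumerate(lines):
--         if slug is None and line.startswith("Slug:"):
--             slug = i + 1
--         if date is None and line.startswith("Date:"):
--             date = i + 1
--         if title is None and line.startswith("Title:"):
--             title = i + 1
--     if slug is not None:
--         return slug
--     if date is not None:
--         return date
--     if title is not None:
--         return title
--     return 0
-- ===== Notes on version B (the rewrite author's own statement) =====
-- stated objective: alternative
-- what changed: Replaces three sequential short-circuiting scans over the lines with a single enumerate pass that records the first Slug/Date/Title insert positions and applies the Slug>Date>Title priority once at the end.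
import Mathlib
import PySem

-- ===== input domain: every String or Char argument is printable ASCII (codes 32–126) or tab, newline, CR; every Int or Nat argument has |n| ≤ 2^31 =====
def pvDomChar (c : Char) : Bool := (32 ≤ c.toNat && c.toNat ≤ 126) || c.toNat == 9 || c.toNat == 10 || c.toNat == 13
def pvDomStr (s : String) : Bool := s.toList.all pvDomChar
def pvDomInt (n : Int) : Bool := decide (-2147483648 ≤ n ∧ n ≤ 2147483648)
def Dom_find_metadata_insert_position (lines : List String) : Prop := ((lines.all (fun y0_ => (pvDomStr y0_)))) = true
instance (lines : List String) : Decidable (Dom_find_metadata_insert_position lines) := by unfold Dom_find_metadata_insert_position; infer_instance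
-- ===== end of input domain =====

-- B merges A's three sequential scans into one pass with a final Slug>Date>Title priority decision; same values everywhere.
-- ===== PORT A =====
-- one 'for i, line in enumerate(lines): if line.startswith(p): return i + 1' loop
def pvLoopFind (p : String) (i : Int) : List String → Option Int
  | [] => none
  | l :: rest => if PySem.Str.startswith l p then some (i + 1) else pvLoopFind p (i + 1) rest

def find_metadata_insert_position (lines : List String) : Int :=
  match pvLoopFind "Slug:" 0 lines with
  | some r => r
  | none =>
    match pvLoopFind "Date:" 0 lines with
    | some r => r
    | none =>
      match pvLoopFind "Title:" 0 lines with
      | some r => r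
      | none => 0

-- ===== PORT B =====
-- single enumerate pass maintaining the three optional insert positions
def pvAltLoop (i : Int) (s d t : Option Int) : List String → Option Int × Option Int × Option Int
  | [] => (s, d, t)
  | l :: rest =>
    pvAltLoop (i + 1)
      (if s.isNone && PySem.Str.startswith l "Slug:" then some (i + 1) else s)
      (if d.isNone && PySem.Str.startswith l "Date:" then some (i + 1) else d)
      (if t.isNone && PySem.Str.startswith l "Title:" then some (i + 1) else t)
      rest

def find_metadata_insert_position_alt (lines : List String) : Int :=
  match pvAltLoop 0 none none none lines with
  | (some r, _, _) => r
  | (none, some r, _) => r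
  | (none, none, some r) => r
  | (none, none, none) => 0

-- ===== PRECONDITION & SPEC =====
def Spec_find_metadata_insert_position (lines : List String) (out : Int) : Prop := out = find_metadata_insert_position_alt lines
instance (lines : List String) (out : Int) : Decidable (Spec_find_metadata_insert_position lines out) := by unfold Spec_find_metadata_insert_position; infer_instance

-- ===== CLAIM (what is proved, stated in full; the proofs are below) =====
def Claim_equal_find_metadata_insert_position : Prop := ∀ (lines : List String), Dom_find_metadata_insert_position lines → Spec_find_metadata_insert_position lines (find_metadata_insert_position lines)

-- ===== LEMMAS AND PROOFS =====

-- ===== VERDICT (by name: the statement is the Claim_ definition above) =====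
lemma pvAltLoop_eq (lines : List String) : ∀ (i : Int) (s d t : Option Int),
    pvAltLoop i s d t lines =
      (s.or (pvLoopFind "Slug:" i lines), d.or (pvLoopFind "Date:" i lines),
        t.or (pvLoopFind "Title:" i lines)) := by
  induction lines with
  | nil => intro i s d t; simp [pvAltLoop, pvLoopFind]
  | cons l rest ih =>
    intro i s d t
    simp only [pvAltLoop, pvLoopFind, ih]
    cases s <;> cases d <;> cases t <;> split_ifs <;> simp_all

theorem find_metadata_insert_position_spec : Claim_equal_find_metadata_insert_position := by
  intro lines _
  show find_metadata_insert_position lines = find_metadata_insert_position_alt lines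
  unfold find_metadata_insert_position find_metadata_insert_position_alt
  rw [pvAltLoop_eq]
  cases pvLoopFind "Slug:" 0 lines <;> cases pvLoopFind "Date:" 0 lines <;>
    cases pvLoopFind "Title:" 0 lines <;> rfl
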